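-- pv_equiv track=rewrite | github.com/Hrumble/tusmo-cheater | main.py | matches_criterias
-- ===== SOURCE A (Python) =====
-- def matches_criterias(word, fixed_letters, misplaced_letters, excluded_letters):
--     does_word_match = True
--     for letter_position, word_letter in enumerate(word):
--
--         # Verifies that it correctly has the fixed letters
--         if word_letter != fixed_letters.get(letter_position, word_letter):
--             does_word_match = False
--             break
--
--         # if the letter is misplaced, and at the same position
--         if word_letter == misplaced_letters.get(letter_position):
--             does_word_match = False
--             break
--
--         # If the word contains excluded letters that are not
--         # 1. In the fixed letters
--         # 2. In the misplaced letters
--         # it does not match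
--         if word_letter in excluded_letters:
--             if not (word_letter in fixed_letters.values() or word_letter in misplaced_letters.values()):
--                 does_word_match = False
--                 break
--
--     # Makes sure the word contains all misplaced letters
--     if not all(letter in word for letter in misplaced_letters.values()):
--         does_word_match = False
--
--     return does_word_match
-- ===== SOURCE B (Python) =====
-- def matches_criterias(word, fixed_letters, misplaced_letters, excluded_letters):
--     # Constraint-by-constraint checks instead of A's fused per-position loop.
--     exempt = set(fixed_letters.values()) | set(misplaced_letters.values())
--     n = len(word)
--     return (
--         all(word[p] == c for p, c in fixed_letters.items() if 0 <= p < n)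
--         and all(word[p] != c for p, c in misplaced_letters.items() if 0 <= p < n)
--         and all(ch not in excluded_letters or ch in exempt for ch in word)
--         and all(c in word for c in misplaced_letters.values())
--     )
-- ===== Notes on version B (the rewrite author's own statement) =====
-- stated objective: simpler
-- what changed: A fuses all constraints into one per-position loop with early break plus a trailing check; B is reorganized by constraint: it builds the exempt set once and returns a plain conjunction of four independent checks (fixed positions, misplaced positions, excluded letters, required letters).
import Mathlib
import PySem

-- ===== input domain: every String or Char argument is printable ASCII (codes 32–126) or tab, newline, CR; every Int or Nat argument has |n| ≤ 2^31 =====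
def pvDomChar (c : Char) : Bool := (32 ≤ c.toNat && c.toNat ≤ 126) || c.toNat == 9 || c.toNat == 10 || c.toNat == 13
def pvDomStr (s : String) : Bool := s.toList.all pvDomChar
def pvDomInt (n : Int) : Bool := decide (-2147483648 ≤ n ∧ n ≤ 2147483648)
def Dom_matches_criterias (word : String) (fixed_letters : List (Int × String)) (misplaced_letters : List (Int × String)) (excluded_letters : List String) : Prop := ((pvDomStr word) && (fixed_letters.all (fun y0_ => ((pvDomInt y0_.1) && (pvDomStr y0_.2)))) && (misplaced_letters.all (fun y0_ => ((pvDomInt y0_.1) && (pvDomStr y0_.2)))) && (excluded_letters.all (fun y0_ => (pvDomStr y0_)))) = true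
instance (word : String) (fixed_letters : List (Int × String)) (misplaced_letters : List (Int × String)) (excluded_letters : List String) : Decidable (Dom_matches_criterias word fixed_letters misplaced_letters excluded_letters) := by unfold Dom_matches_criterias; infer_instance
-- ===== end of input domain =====

-- B replaces A's fused per-position loop (early break + trailing pass) by a conjunction of four
-- independent constraint checks over a precomputed exempt set; objective: simpler.
-- ===== PORT A =====
def matchesLoop (fd md : PySem.Dict Int String) (ex : List String) : List (Int × Char) → Bool
  | [] => true
  | (i, c) :: rest =>
    let w := String.mk [c]
    if w ≠ fd.getD i w then false
    else if md.get? i = some w then false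
    else if ex.contains w && !(fd.values.contains w || md.values.contains w) then false
    else matchesLoop fd md ex rest

def matches_criterias (word : String) (fixed_letters : List (Int × String)) (misplaced_letters : List (Int × String)) (excluded_letters : List String) : Bool :=
  let fd := PySem.Dict.ofList fixed_letters
  let md := PySem.Dict.ofList misplaced_letters
  let does_word_match := matchesLoop fd md excluded_letters (PySem.List.enumerate word.toList 0)
  if !(md.values.all (fun v => PySem.Str.isIn v word)) then false else does_word_match

-- ===== PORT B =====
def matches_criterias_alt (word : String) (fixed_letters : List (Int × String)) (misplaced_letters : List (Int × String)) (excluded_letters : List String) : Bool :=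
  let fd := PySem.Dict.ofList fixed_letters
  let md := PySem.Dict.ofList misplaced_letters
  let exempt := PySem.Set.union (PySem.Set.ofList fd.values) (PySem.Set.ofList md.values)
  let n : Int := word.toList.length
  let inRange : Int × String → Bool := fun p => decide (0 ≤ p.1) && decide (p.1 < n)
  let charAt : Int → Option String := fun i => (PySem.Str.pyGet? word i).map (fun ch => String.mk [ch])
  ((fd.items.filter inRange).all (fun p => charAt p.1 == some p.2)) &&
  ((md.items.filter inRange).all (fun p => charAt p.1 != some p.2)) &&
  (word.toList.all (fun ch => !(excluded_letters.contains (String.mk [ch])) || exempt.contains (String.mk [ch]))) &&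
  (md.values.all (fun v => PySem.Str.isIn v word))

-- ===== PRECONDITION & SPEC =====
def Spec_matches_criterias (word : String) (fixed_letters : List (Int × String)) (misplaced_letters : List (Int × String)) (excluded_letters : List String) (out : Bool) : Prop := out = matches_criterias_alt word fixed_letters misplaced_letters excluded_letters
instance (word : String) (fixed_letters : List (Int × String)) (misplaced_letters : List (Int × String)) (excluded_letters : List String) (out : Bool) : Decidable (Spec_matches_criterias word fixed_letters misplaced_letters excluded_letters out) := by unfold Spec_matches_criterias; infer_instance

-- ===== CLAIM (what is proved, stated in full; the proofs are below) =====
def Claim_equal_matches_criterias : Prop := ∀ (word : String) (fixed_letters : List (Int × String)) (misplaced_letters : List (Int × String)) (excluded_letters : List String), Dom_matches_criterias word fixed_letters misplaced_letters excluded_letters → Spec_matches_criterias word fixed_letters misplaced_letters excluded_letters (matches_criterias word fixed_letters misplaced_letters excluded_letters)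

-- ===== LEMMAS AND PROOFS =====

-- Per-position property A's loop enforces (prop form).
def pvP (fd md : PySem.Dict Int String) (ex : List String) (p : Int × Char) : Prop :=
  String.mk [p.2] = fd.getD p.1 (String.mk [p.2]) ∧
  md.get? p.1 ≠ some (String.mk [p.2]) ∧
  (String.mk [p.2] ∈ ex → String.mk [p.2] ∈ fd.values ∨ String.mk [p.2] ∈ md.values)

theorem matchesLoop_iff (fd md : PySem.Dict Int String) (ex : List String) (l : List (Int × Char)) :
    matchesLoop fd md ex l = true ↔ ∀ p ∈ l, pvP fd md ex p := by
  induction l with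
  | nil => simp [matchesLoop]
  | cons hd rest ih =>
    obtain ⟨i, c⟩ := hd
    rw [matchesLoop]
    constructor
    · intro h
      by_cases h1 : String.mk [c] ≠ fd.getD i (String.mk [c])
      · rw [if_pos h1] at h; cases h
      rw [if_neg h1] at h
      by_cases h2 : md.get? i = some (String.mk [c])
      · rw [if_pos h2] at h; cases h
      rw [if_neg h2] at h
      by_cases h3 : (ex.contains (String.mk [c]) && !(fd.values.contains (String.mk [c]) || md.values.contains (String.mk [c]))) = true
      · rw [if_pos h3] at h; cases h
      rw [if_neg h3] at h
      intro p hp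
      rcases List.mem_cons.mp hp with rfl | hp'
      · refine ⟨not_not.mp h1, h2, fun hmem => ?_⟩
        by_contra hno
        rw [not_or] at hno
        apply h3
        rw [Bool.and_eq_true, Bool.not_eq_true', Bool.or_eq_false_iff]
        exact ⟨by simpa using hmem, by simpa using hno.1, by simpa using hno.2⟩
      · exact (ih.mp h) p hp'
    · intro hall
      have hp0 := hall (i, c) (List.mem_cons_self ..)
      obtain ⟨q1, q2, q3⟩ := hp0
      have h1' : ¬ (String.mk [c] ≠ fd.getD i (String.mk [c])) := fun hne => hne q1
      have h3' : ¬ ((ex.contains (String.mk [c]) && !(fd.values.contains (String.mk [c]) || md.values.contains (String.mk [c]))) = true) := by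
        intro hb
        rw [Bool.and_eq_true, Bool.not_eq_true', Bool.or_eq_false_iff] at hb
        obtain ⟨ha, hbb, hcc⟩ := hb
        rcases q3 (by simpa using ha) with hm | hm
        · simp [hm] at hbb
        · simp [hm] at hcc
      rw [if_neg h1', if_neg q2, if_neg h3']
      exact ih.mpr (fun p hp => hall p (List.mem_cons_of_mem _ hp))

theorem getD_self_iff (fd : PySem.Dict Int String) (hfd : fd.keys.Nodup) (i : Int) (w : String) :
    (w = fd.getD i w) ↔ ∀ v, (i, v) ∈ fd.items → v = w := by
  rw [PySem.Dict.getD_eq_get?_getD]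
  cases h : fd.get? i with
  | none =>
    simp only [Option.getD_none]
    constructor
    · intro _ v hv
      have := fd.get?_of_mem_items hv hfd
      rw [h] at this; cases this
    · intro _; trivial
  | some v0 =>
    simp only [Option.getD_some]
    constructor
    · intro hw v hv
      have := fd.get?_of_mem_items hv hfd
      rw [h] at this
      injection this with hv0
      exact hv0 ▸ hw.symm
    · intro hall
      exact (hall v0 (fd.mem_items_of_get?_eq_some h)).symm

theorem get?_ne_iff (md : PySem.Dict Int String) (hmd : md.keys.Nodup) (i : Int) (w : String) :
    (md.get? i ≠ some w) ↔ ∀ v, (i, v) ∈ md.items → v ≠ w := by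
  rw [Ne, PySem.Dict.get?_eq_some_iff_mem_items md i w hmd]
  constructor
  · intro hne v hv hvw; exact hne (hvw ▸ hv)
  · intro hall hmem; exact hall w hmem rfl

-- word[j] as a 1-char string, for an in-range Nat index
theorem charAt_of_range (word : String) (j : Nat) (hj : j < word.toList.length) :
    (PySem.Str.pyGet? word (j : Int)).map (fun ch => String.mk [ch]) =
      some (String.mk [word.toList[j]]) := by
  rw [PySem.Str.pyGet?_natCast, List.getElem?_eq_getElem hj]
  rfl

theorem fixed_check_iff (word : String) (fd : PySem.Dict Int String) (hfd : fd.keys.Nodup) :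
    (∀ p ∈ PySem.List.enumerate word.toList 0, String.mk [p.2] = fd.getD p.1 (String.mk [p.2])) ↔
    (∀ q ∈ fd.items, 0 ≤ q.1 → q.1 < (word.toList.length : Int) →
      (PySem.Str.pyGet? word q.1).map (fun ch => String.mk [ch]) = some q.2) := by
  constructor
  · intro h q hq h0 hn
    have hj : q.1.toNat < word.toList.length := by omega
    have hmem : ((0 : Int) + (q.1.toNat : Nat), word.toList[q.1.toNat]) ∈ PySem.List.enumerate word.toList 0 := by
      rw [PySem.List.mem_enumerate_iff]
      exact ⟨q.1.toNat, hj, rfl⟩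
    have hq1 : ((0 : Int) + (q.1.toNat : Nat)) = q.1 := by omega
    rw [hq1] at hmem
    have hgd := h _ hmem
    have hv := (getD_self_iff fd hfd q.1 (String.mk [word.toList[q.1.toNat]'hj])).mp hgd q.2 (by
      have : (q.1, q.2) = q := rfl
      rw [this]; exact hq)
    have hcast : q.1 = ((q.1.toNat : Nat) : Int) := (Int.toNat_of_nonneg h0).symm
    rw [hcast, charAt_of_range word q.1.toNat hj, hv]
  · intro h p hp
    rw [PySem.List.mem_enumerate_iff] at hp
    obtain ⟨k, hk, rfl⟩ := hp
    simp only [zero_add]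
    rw [getD_self_iff fd hfd]
    intro v hv
    have h0 : (0 : Int) ≤ (k : Int) := by omega
    have hn : ((k : Int)) < (word.toList.length : Int) := by omega
    have := h ((k : Int), v) hv h0 hn
    rw [charAt_of_range word k hk] at this
    injection this with hv'
    exact hv'.symm

theorem misplaced_check_iff (word : String) (md : PySem.Dict Int String) (hmd : md.keys.Nodup) :
    (∀ p ∈ PySem.List.enumerate word.toList 0, md.get? p.1 ≠ some (String.mk [p.2])) ↔
    (∀ q ∈ md.items, 0 ≤ q.1 → q.1 < (word.toList.length : Int) →
      (PySem.Str.pyGet? word q.1).map (fun ch => String.mk [ch]) ≠ some q.2) := by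
  constructor
  · intro h q hq h0 hn
    have hj : q.1.toNat < word.toList.length := by omega
    have hcast : q.1 = ((q.1.toNat : Nat) : Int) := (Int.toNat_of_nonneg h0).symm
    rw [hcast, charAt_of_range word q.1.toNat hj]
    intro heq
    injection heq with heq
    have hmem : ((0 : Int) + (q.1.toNat : Nat), word.toList[q.1.toNat]) ∈ PySem.List.enumerate word.toList 0 := by
      rw [PySem.List.mem_enumerate_iff]
      exact ⟨q.1.toNat, hj, rfl⟩
    have hq1 : ((0 : Int) + (q.1.toNat : Nat)) = q.1 := by omega
    rw [hq1] at hmem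
    have := (get?_ne_iff md hmd q.1 (String.mk [word.toList[q.1.toNat]'hj])).mp (h _ hmem) q.2 (by
      have : (q.1, q.2) = q := rfl
      rw [this]; exact hq)
    exact this heq.symm
  · intro h p hp
    rw [PySem.List.mem_enumerate_iff] at hp
    obtain ⟨k, hk, rfl⟩ := hp
    simp only [zero_add]
    rw [get?_ne_iff md hmd]
    intro v hv hveq
    have h0 : (0 : Int) ≤ (k : Int) := by omega
    have hn : ((k : Int)) < (word.toList.length : Int) := by omega
    have := h ((k : Int), v) hv h0 hn
    rw [charAt_of_range word k hk] at this
    exact this (by rw [hveq])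

-- ===== VERDICT (by name: the statement is the Claim_ definition above) =====
theorem matches_criterias_spec : Claim_equal_matches_criterias := by
  intro word fl ml el _
  unfold Spec_matches_criterias
  simp only [matches_criterias, matches_criterias_alt]
  have hfd := PySem.Dict.nodup_keys_ofList fl
  have hmd := PySem.Dict.nodup_keys_ofList ml
  cases hc4 : (PySem.Dict.ofList ml).values.all (fun v => PySem.Str.isIn v word) with
  | false => simp
  | true =>
    simp only [Bool.not_true, Bool.false_eq_true, if_false, Bool.and_true]
    rw [Bool.eq_iff_iff, matchesLoop_iff]
    simp only [List.all_eq_true, Bool.and_eq_true, List.mem_filter, Bool.and_eq_true,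
      decide_eq_true_eq, Bool.or_eq_true, Bool.not_eq_true', beq_iff_eq, bne_iff_ne,
      PySem.Set.contains_iff, PySem.Set.mem_union, PySem.Set.mem_ofList]
    constructor
    · intro h
      refine ⟨⟨fun q hq => ?_, fun q hq => ?_⟩, fun ch hch => ?_⟩
      · exact (fixed_check_iff word _ hfd).mp (fun p hp => (h p hp).1) q hq.1 hq.2.1 hq.2.2
      · exact (misplaced_check_iff word _ hmd).mp (fun p hp => (h p hp).2.1) q hq.1 hq.2.1 hq.2.2
      · obtain ⟨k, hk, rfl⟩ := List.mem_iff_getElem.mp hch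
        have hmem : ((0 : Int) + (k : Nat), word.toList[k]) ∈ PySem.List.enumerate word.toList 0 := by
          rw [PySem.List.mem_enumerate_iff]
          exact ⟨k, hk, rfl⟩
        have h3 := (h _ hmem).2.2
        by_cases hin : String.mk [word.toList[k]] ∈ el
        · exact Or.inr (h3 hin)
        · exact Or.inl (by simp [hin])
    · intro ⟨⟨h1, h2⟩, h3⟩ p hp
      refine ⟨?_, ?_, ?_⟩
      · exact (fixed_check_iff word _ hfd).mpr (fun q hq a b => h1 q ⟨hq, a, b⟩) p hp
      · exact (misplaced_check_iff word _ hmd).mpr (fun q hq a b => h2 q ⟨hq, a, b⟩) p hp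
      · rw [PySem.List.mem_enumerate_iff] at hp
        obtain ⟨k, hk, rfl⟩ := hp
        have h3' := h3 word.toList[k] (List.getElem_mem hk)
        intro hin
        rcases h3' with hc | hm
        · simp [hin] at hc
        · exact hm
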